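-- pv_equiv track=rewrite | github.com/fenceMeshwire/python_network_interaction | 05_optimal_subnet_mask.py | confirm_possible_hosts
-- ===== SOURCE A (Python) =====
-- def confirm_possible_hosts(number_of_adresses):
--     if (number_of_adresses // 255) == 0:
--         ubound = 2
--         level = number_of_adresses
--         counter = 0
--     else:
--         ubound = 1 + number_of_adresses // 255
--         level = 255
--         counter = 2
--     for a in range(1, ubound):
--         for b in range(1, level + 1):
--             counter += 1
--     return counter
-- ===== SOURCE B (Python) =====
-- def confirm_possible_hosts(number_of_adresses):
--     if number_of_adresses < 255:
--         return number_of_adresses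
--     return 2 + 255 * (number_of_adresses // 255)
-- ===== Notes on version B (the rewrite author's own statement) =====
-- stated objective: faster
-- what changed: Replaced the nested counting loops with closed-form arithmetic on the floor quotient (O(1) instead of O(n)); Pre_ restricts to nonnegative address counts, the function's natural domain, since neither program's value is meaningful for a negative count.
-- outside the precondition, e.g. on confirm_possible_hosts(-300): A returns 2, B returns -300
import Mathlib
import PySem

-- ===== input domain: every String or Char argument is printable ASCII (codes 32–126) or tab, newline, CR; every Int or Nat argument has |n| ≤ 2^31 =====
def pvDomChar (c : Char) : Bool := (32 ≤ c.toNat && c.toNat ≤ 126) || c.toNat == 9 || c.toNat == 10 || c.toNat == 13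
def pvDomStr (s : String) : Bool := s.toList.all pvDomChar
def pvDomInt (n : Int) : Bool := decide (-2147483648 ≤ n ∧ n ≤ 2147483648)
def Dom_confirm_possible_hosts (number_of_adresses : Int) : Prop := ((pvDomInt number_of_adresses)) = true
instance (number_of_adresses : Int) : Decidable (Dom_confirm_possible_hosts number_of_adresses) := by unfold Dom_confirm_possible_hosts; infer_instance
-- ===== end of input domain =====

-- B replaces the nested counting loops with closed-form arithmetic on n // 255 (objective: faster).

-- ===== PORT A =====
def confirm_possible_hosts (number_of_adresses : Int) : Int :=
  let p : Int × Int × Int :=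
    if PySem.Int.floordiv number_of_adresses 255 == 0 then
      (2, number_of_adresses, 0)
    else
      (1 + PySem.Int.floordiv number_of_adresses 255, 255, 2)
  (PySem.List.pyRange 1 p.1 1).foldl
    (fun counter _ => (PySem.List.pyRange 1 (p.2.1 + 1) 1).foldl (fun c _ => c + 1) counter)
    p.2.2

-- ===== PORT B =====
def confirm_possible_hosts_alt (number_of_adresses : Int) : Int :=
  if number_of_adresses < 255 then number_of_adresses
  else 2 + 255 * PySem.Int.floordiv number_of_adresses 255

-- ===== PRECONDITION & SPEC =====
-- Pre_ restricts to nonnegative address counts, the function's natural domain (an address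
-- count is a size); neither program's value is meaningful for a negative count.
def Pre_confirm_possible_hosts (number_of_adresses : Int) : Prop := 0 ≤ number_of_adresses
instance (number_of_adresses : Int) : Decidable (Pre_confirm_possible_hosts number_of_adresses) := by unfold Pre_confirm_possible_hosts; infer_instance
def pvWitness_confirm_possible_hosts : Int := 300

def Spec_confirm_possible_hosts (number_of_adresses : Int) (out : Int) : Prop := out = confirm_possible_hosts_alt number_of_adresses
instance (number_of_adresses : Int) (out : Int) : Decidable (Spec_confirm_possible_hosts number_of_adresses out) := by unfold Spec_confirm_possible_hosts; infer_instance

-- ===== CLAIM (what is proved, stated in full; the proofs are below) =====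
def Claim_equal_confirm_possible_hosts : Prop := ∀ (number_of_adresses : Int), Dom_confirm_possible_hosts number_of_adresses → Pre_confirm_possible_hosts number_of_adresses → Spec_confirm_possible_hosts number_of_adresses (confirm_possible_hosts number_of_adresses)

-- ===== LEMMAS AND PROOFS =====

-- each inner loop adds 1 per element, so it adds its length
theorem pv_foldl_one {α : Type} (xs : List α) (c : Int) :
    xs.foldl (fun c2 _ => c2 + 1) c = c + xs.length := by
  induction xs generalizing c with
  | nil => simp
  | cons x t ih => simp [List.foldl, ih]; omega

-- a loop whose body adds the constant m adds length * m
theorem pv_foldl_const {α : Type} (xs : List α) (c m : Int) :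
    xs.foldl (fun counter (_ : α) => counter + m) c = c + xs.length * m := by
  induction xs generalizing c with
  | nil => simp
  | cons x t ih => simp [List.foldl, ih]; ring

theorem pv_nested (a b c : Int) :
    (PySem.List.pyRange 1 a 1).foldl
      (fun counter _ => (PySem.List.pyRange 1 (b + 1) 1).foldl (fun c2 _ => c2 + 1) counter) c
    = c + ((a - 1).toNat : Int) * (b.toNat : Int) := by
  have hfun : (fun (counter : Int) (_ : Int) =>
      (PySem.List.pyRange 1 (b + 1) 1).foldl (fun c2 _ => c2 + 1) counter)
      = fun counter (_ : Int) => counter + (b.toNat : Int) := by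
    funext counter x
    rw [pv_foldl_one]
    simp [PySem.List.length_pyRange_one]
  rw [hfun, pv_foldl_const]
  simp [PySem.List.length_pyRange_one]

theorem confirm_possible_hosts_eq (n : Int) (hn : 0 ≤ n) :
    confirm_possible_hosts n = confirm_possible_hosts_alt n := by
  unfold confirm_possible_hosts confirm_possible_hosts_alt
  have hq := PySem.Int.floordiv_eq_iff_of_pos (a := n) (b := 255)
    (q := PySem.Int.floordiv n 255) (by omega)
  have hqs : PySem.Int.floordiv n 255 * 255 ≤ n ∧
      n < (PySem.Int.floordiv n 255 + 1) * 255 := hq.mp rfl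
  set q := PySem.Int.floordiv n 255 with hqdef
  have hq0 : 0 ≤ q := by nlinarith [hqs.1, hqs.2]
  by_cases h : q = 0
  · have hlt : n < 255 := by omega
    simp only [h, beq_self_eq_true, if_true, hlt]
    rw [pv_nested]
    have h1 : (((2:Int) - 1).toNat : Int) = 1 := rfl
    rw [h1, one_mul]
    omega
  · have hge : ¬ n < 255 := by omega
    simp only [beq_iff_eq, h, if_false, hge]
    rw [pv_nested]
    have h1 : ((1 + q - 1).toNat : Int) = q := by omega
    have h2 : (((255 : Int).toNat : Int)) = 255 := rfl
    rw [h1, h2]; ring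

-- ===== VERDICT (by name: the statement is the Claim_ definition above) =====
theorem confirm_possible_hosts_spec : Claim_equal_confirm_possible_hosts := by
  intro n _ hpre
  exact confirm_possible_hosts_eq n hpre
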